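-- pv_equiv track=rewrite | github.com/Jensen6842/SOF1 | SOF1-Formative-1/ClosedExamination/question_2.py | create_chequerboard
-- ===== SOURCE A (Python) =====
-- def create_chequerboard(n):
--     """When given an integer n, returns a string representing a chequerboard
--     of size n x n.
--
--     Args:
--         n (Integer): Height and width of the chequerboard.
--
--     Returns:
--         output (String): A chequerboard drawn using the - and x characters.
--         None (Boolean)
--     """
--     if n < 2:
--         return None
--     output = ""
--     for i in range(1, n+1):
--         for j in range(1, n+1):
--             if i % 2 == 0:
--                 first = "x"
--                 second = "-"
--             else:
--                 first = "-"
--                 second = "x"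
--             if j % 2 == 0:
--                 output = output + first
--             else:
--                 output = output + second
--         output = output + "\n"
--     return output
-- ===== SOURCE B (Python) =====
-- def create_chequerboard(n):
--     if n < 2:
--         return None
--     odd_row = "".join("x" if j % 2 else "-" for j in range(1, n + 1)) + "\n"
--     even_row = "".join("-" if j % 2 else "x" for j in range(1, n + 1)) + "\n"
--     return "".join(odd_row if i % 2 else even_row for i in range(1, n + 1))
-- ===== Notes on version B (the rewrite author's own statement) =====
-- stated objective: faster
-- what changed: B precomputes the two alternating row templates once and joins one picked template per row, replacing A's per-cell parity branch with character-by-character string concatenation that recopies the growing output on every append.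
import Mathlib
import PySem

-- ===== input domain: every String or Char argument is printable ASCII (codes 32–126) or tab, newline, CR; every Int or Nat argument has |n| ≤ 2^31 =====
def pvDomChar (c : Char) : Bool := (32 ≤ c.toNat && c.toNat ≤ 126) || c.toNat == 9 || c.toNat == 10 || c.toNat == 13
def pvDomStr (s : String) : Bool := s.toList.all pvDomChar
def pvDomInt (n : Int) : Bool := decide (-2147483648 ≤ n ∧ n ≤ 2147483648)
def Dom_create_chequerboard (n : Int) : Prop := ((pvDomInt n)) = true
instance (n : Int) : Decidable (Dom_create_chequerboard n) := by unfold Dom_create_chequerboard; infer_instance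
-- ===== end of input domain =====

-- B precomputes the two alternating row templates once and picks one per row, instead of
-- A's per-cell branch inside nested loops; objective: faster (one join instead of per-character recopying concatenation).

-- ===== PORT A =====
def create_chequerboard (n : Int) : Option String :=
  if n < 2 then none
  else
    some ((PySem.List.pyRange 1 (n + 1) 1).foldl (fun output i =>
      ((PySem.List.pyRange 1 (n + 1) 1).foldl (fun output j =>
        let first := if PySem.Int.mod i 2 = 0 then "x" else "-"
        let second := if PySem.Int.mod i 2 = 0 then "-" else "x"
        if PySem.Int.mod j 2 = 0 then output ++ first else output ++ second) output)
      ++ "\n") "")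

-- ===== PORT B =====
def create_chequerboard_alt (n : Int) : Option String :=
  if n < 2 then none
  else
    let odd_row :=
      String.join ((PySem.List.pyRange 1 (n + 1) 1).map
        (fun j => if PySem.Int.mod j 2 ≠ 0 then "x" else "-")) ++ "\n"
    let even_row :=
      String.join ((PySem.List.pyRange 1 (n + 1) 1).map
        (fun j => if PySem.Int.mod j 2 ≠ 0 then "-" else "x")) ++ "\n"
    some (String.join ((PySem.List.pyRange 1 (n + 1) 1).map
      (fun i => if PySem.Int.mod i 2 ≠ 0 then odd_row else even_row)))

-- ===== PRECONDITION & SPEC =====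
def Spec_create_chequerboard (n : Int) (out : Option String) : Prop := out = create_chequerboard_alt n
instance (n : Int) (out : Option String) : Decidable (Spec_create_chequerboard n out) := by unfold Spec_create_chequerboard; infer_instance

-- ===== CLAIM (what is proved, stated in full; the proofs are below) =====
def Claim_equal_create_chequerboard : Prop := ∀ (n : Int), Dom_create_chequerboard n → Spec_create_chequerboard n (create_chequerboard n)

-- ===== LEMMAS AND PROOFS =====

-- a left fold that appends f x for each element equals the join of the mapped list
theorem pv_foldl_join (l : List String) (s : String) :
    List.foldl (fun r t => r ++ t) s l = s ++ List.foldl (fun r t => r ++ t) "" l := by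
  induction l generalizing s with
  | nil => simp
  | cons a t ih => rw [List.foldl_cons, List.foldl_cons, ih, ih ("" ++ a)]; simp [String.append_assoc]

theorem pv_foldl_str_append (f : Int → String) (l : List Int) (o : String) :
    l.foldl (fun acc x => acc ++ f x) o = o ++ String.join (l.map f) := by
  induction l generalizing o with
  | nil => simp [String.join]
  | cons a t ih => rw [List.foldl_cons, ih, String.join, String.join, List.map_cons,
      List.foldl_cons, pv_foldl_join _ ("" ++ f a)]; simp [String.append_assoc]

theorem pv_inner_row (i : Int) (l : List Int) (o : String) :
    l.foldl (fun output j => if PySem.Int.mod j 2 = 0 then output ++ (if PySem.Int.mod i 2 = 0 then "x" else "-") else output ++ (if PySem.Int.mod i 2 = 0 then "-" else "x")) o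
    = o ++ String.join (l.map (fun j => if PySem.Int.mod j 2 ≠ 0 then (if PySem.Int.mod i 2 = 0 then "-" else "x") else (if PySem.Int.mod i 2 = 0 then "x" else "-"))) := by
  rw [show (fun (output : String) (j : Int) => if PySem.Int.mod j 2 = 0 then output ++ (if PySem.Int.mod i 2 = 0 then "x" else "-") else output ++ (if PySem.Int.mod i 2 = 0 then "-" else "x"))
      = (fun output j => output ++ (if PySem.Int.mod j 2 ≠ 0 then (if PySem.Int.mod i 2 = 0 then "-" else "x") else (if PySem.Int.mod i 2 = 0 then "x" else "-"))) from
    funext fun o => funext fun j => by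
      by_cases hj : PySem.Int.mod j 2 = 0
      · rw [if_pos hj, if_neg (not_not_intro hj)]
      · rw [if_neg hj, if_pos hj]]
  exact pv_foldl_str_append _ l o

-- ===== VERDICT (by name: the statement is the Claim_ definition above) =====
theorem create_chequerboard_spec : Claim_equal_create_chequerboard := by
  intro n _
  unfold Spec_create_chequerboard create_chequerboard create_chequerboard_alt
  by_cases h : n < 2
  · simp [h]
  · simp only [h]
    simp only [if_false, Option.some.injEq]
    rw [show (fun (output : String) (i : Int) =>
          List.foldl (fun output j => if PySem.Int.mod j 2 = 0 then output ++ (if PySem.Int.mod i 2 = 0 then "x" else "-") else output ++ (if PySem.Int.mod i 2 = 0 then "-" else "x")) output (PySem.List.pyRange 1 (n + 1) 1) ++ "\n")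
        = (fun output i => output ++ (String.join ((PySem.List.pyRange 1 (n + 1) 1).map (fun j => if PySem.Int.mod j 2 ≠ 0 then (if PySem.Int.mod i 2 = 0 then "-" else "x") else (if PySem.Int.mod i 2 = 0 then "x" else "-"))) ++ "\n")) from
      funext fun o => funext fun i => by rw [pv_inner_row, String.append_assoc]]
    rw [pv_foldl_str_append]
    have hmap : (fun (i : Int) => String.join ((PySem.List.pyRange 1 (n + 1) 1).map (fun j => if PySem.Int.mod j 2 ≠ 0 then (if PySem.Int.mod i 2 = 0 then "-" else "x") else (if PySem.Int.mod i 2 = 0 then "x" else "-"))) ++ "\n")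
        = (fun i => if PySem.Int.mod i 2 ≠ 0
            then String.join ((PySem.List.pyRange 1 (n + 1) 1).map (fun j => if PySem.Int.mod j 2 ≠ 0 then "x" else "-")) ++ "\n"
            else String.join ((PySem.List.pyRange 1 (n + 1) 1).map (fun j => if PySem.Int.mod j 2 ≠ 0 then "-" else "x")) ++ "\n") := by
      funext i
      by_cases hi : PySem.Int.mod i 2 = 0
      · rw [if_neg (not_not_intro hi)]
        exact congrArg (· ++ "\n") (congrArg String.join (List.map_congr_left (fun j _ => by rw [if_pos hi, if_pos hi])))
      · rw [if_pos hi]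
        exact congrArg (· ++ "\n") (congrArg String.join (List.map_congr_left (fun j _ => by rw [if_neg hi, if_neg hi])))
    rw [hmap]; simp
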